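-- pv_equiv track=rewrite | github.com/colll78/AISnippets | astar_anagrams.py | anagram_expand
-- ===== SOURCE A (Python) =====
-- def longest_common_subsequence(X, Y):
--     # use dynamic programming to find the longest common subsequence
--     dp = [[0] * (len(X) + 1) for i in range(len(Y) + 1)]
--     lcs = 0
--     substr_ind = 0
--     for i in range(1, len(X) + 1):
--         for j in range(1, len(Y) + 1):
--             if X[i - 1] == Y[j - 1]:
--                 dp[i][j] = dp[i - 1][j - 1] + 1
--                 if dp[i][j] > lcs:
--                     lcs = dp[i][j]
--                     substr_ind = i
--     return lcs, substr_ind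
--
-- def heuristic(state, goal):
--     # the heuristic uses the length of the longest common subsequence, along with
--     # the distance between the common subsequence in the goal state and the current state.
--     lcs, substr_ind = longest_common_subsequence(state, goal)
--     substr = state[substr_ind-lcs:substr_ind]
--     substr_ind = substr_ind - lcs
--     goal_ind = goal.find(substr)
--     num_moves = abs(goal_ind - substr_ind)
--     if(goal_ind < substr_ind):
--         num_moves = abs(substr_ind - len(goal)) + abs(goal_ind - 0)
--     h = len(state) - lcs + num_moves
--     return h
--
-- def anagram_expand(state, goal):
--     node_list = []
--
--     for pos in range(len(state) - 1):  # Create each possible state that can be created from the current one in a single step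
--         new_state = state[:pos] + state[-1:] + state[pos:-1]
--
--         # Very simple h' function - please improve!
--         if new_state == goal:
--             score = 0
--         else:
--             score = heuristic(new_state, goal)
--
--         node_list.append((new_state, score))
--
--     return node_list
-- ===== SOURCE B (Python) =====
-- def _suffix_run(X, Y, i, j):
--     # length of the longest common suffix of X[:i] and Y[:j], by direct comparison
--     r = 0
--     while i - r >= 1 and j - r >= 1 and X[i - r - 1] == Y[j - r - 1]:
--         r += 1
--     return r
--
-- def _best_common_run(X, Y):
--     # best = length of the longest common substring of X and Y;
--     # best_i = smallest end index in X (1-based) of a common substring of that length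
--     runs = [(_suffix_run(X, Y, i, j), i)
--             for i in range(1, len(X) + 1) for j in range(1, len(Y) + 1)]
--     best = 0
--     for r, _ in runs:
--         if r > best:
--             best = r
--     if best == 0:
--         return 0, 0
--     best_i = min((i for r, i in runs if r == best), default=0)
--     return best, best_i
--
-- def heuristic(state, goal):
--     lcs, substr_ind = _best_common_run(state, goal)
--     substr = state[substr_ind - lcs:substr_ind]
--     substr_ind = substr_ind - lcs
--     goal_ind = goal.find(substr)
--     num_moves = abs(goal_ind - substr_ind)
--     if goal_ind < substr_ind:
--         num_moves = abs(substr_ind - len(goal)) + abs(goal_ind - 0)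
--     return len(state) - lcs + num_moves
--
-- def anagram_expand(state, goal):
--     last = state[-1:]
--     candidates = [state[:pos] + last + state[pos:-1] for pos in range(len(state) - 1)]
--     return [(ns, 0 if ns == goal else heuristic(ns, goal)) for ns in candidates]
-- ===== Notes on version B (the rewrite author's own statement) =====
-- stated objective: alternative
-- what changed: Replaces the incremental O(n*m) DP table for the longest-common-substring length/end-index with a direct per-pair common-suffix scan plus an explicit running-max and min-index selection, and builds the successor list with comprehensions instead of an accumulating loop.
import Mathlib
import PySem

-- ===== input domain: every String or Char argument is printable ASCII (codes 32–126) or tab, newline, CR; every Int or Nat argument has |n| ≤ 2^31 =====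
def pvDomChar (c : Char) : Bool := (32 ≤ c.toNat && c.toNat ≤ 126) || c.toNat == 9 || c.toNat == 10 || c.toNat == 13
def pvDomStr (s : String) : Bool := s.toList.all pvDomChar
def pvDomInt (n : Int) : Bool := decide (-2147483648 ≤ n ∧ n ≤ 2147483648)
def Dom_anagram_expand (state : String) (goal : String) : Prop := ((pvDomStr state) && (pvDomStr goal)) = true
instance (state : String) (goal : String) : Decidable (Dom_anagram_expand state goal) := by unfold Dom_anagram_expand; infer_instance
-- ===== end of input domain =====

-- B replaces A's DP table for the longest-common-substring statistics by a direct
-- per-pair common-suffix scan with explicit max/min selection (alternative algorithm, same results).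


-- ===== PORT A =====
-- longest_common_subsequence's inner-loop body (one (i, j) cell of the two nested loops)
def pvLcsCell (X Y : List Char) (i : Int) (st : List (List Int) × Int × Int) (j : Int) :
    List (List Int) × Int × Int :=
  if PySem.List.pyGet? X (i - 1) == PySem.List.pyGet? Y (j - 1) then
    let v := PySem.List.pyGetD (PySem.List.pyGetD st.1 (i - 1) []) (j - 1) 0 + 1
    let dp' := PySem.List.pySetD st.1 i (PySem.List.pySetD (PySem.List.pyGetD st.1 i []) j v)
    if v > st.2.1 then (dp', v, i) else (dp', st.2.1, st.2.2)
  else st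

-- one iteration of the outer 'for i in range(1, len(X)+1)' loop
def pvLcsInner (X Y : List Char) (st : List (List Int) × Int × Int) (i : Int) :
    List (List Int) × Int × Int :=
  (PySem.List.pyRange 1 ((Y.length : Int) + 1) 1).foldl (pvLcsCell X Y i) st

-- longest_common_subsequence(X, Y) (on the character lists)
def pvLcsA (X Y : List Char) : Int × Int :=
  let dp0 : List (List Int) :=
    (PySem.List.pyRange 0 ((Y.length : Int) + 1) 1).map
      (fun _ => PySem.List.pyRepeat [(0 : Int)] ((X.length : Int) + 1))
  let r := (PySem.List.pyRange 1 ((X.length : Int) + 1) 1).foldl (pvLcsInner X Y) (dp0, 0, 0)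
  r.2

-- heuristic(state, goal) (on the character lists)
def pvHeurA (state goal : List Char) : Int :=
  let p := pvLcsA state goal
  let substr := PySem.List.slice state (some (p.2 - p.1)) (some p.2)
  let substr_ind := p.2 - p.1
  let goal_ind := PySem.Chars.find goal substr
  let num_moves := |goal_ind - substr_ind|
  let num_moves' := if goal_ind < substr_ind then |substr_ind - (goal.length : Int)| + |goal_ind - 0| else num_moves
  (state.length : Int) - p.1 + num_moves'

def anagram_expand (state : String) (goal : String) : List (String × Int) :=
  (PySem.List.pyRange 0 ((state.toList.length : Int) - 1) 1).foldl
    (fun node_list pos =>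
      node_list ++
        [(String.ofList (PySem.List.slice state.toList none (some pos) ++
                     PySem.List.slice state.toList (some (-1)) none ++
                     PySem.List.slice state.toList (some pos) (some (-1))),
          if (PySem.List.slice state.toList none (some pos) ++
              PySem.List.slice state.toList (some (-1)) none ++
              PySem.List.slice state.toList (some pos) (some (-1))) = goal.toList then (0 : Int)
          else pvHeurA (PySem.List.slice state.toList none (some pos) ++
                        PySem.List.slice state.toList (some (-1)) none ++
                        PySem.List.slice state.toList (some pos) (some (-1))) goal.toList)])
    []

-- ===== PORT B =====
-- _suffix_run's while loop: r counts matching characters X[i-1-r] = Y[j-1-r]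
def pvRunAux (X Y : List Char) (i j r : Int) : Int :=
  if h : 1 ≤ i - r ∧ 1 ≤ j - r ∧
      (PySem.List.pyGet? X (i - r - 1) == PySem.List.pyGet? Y (j - r - 1)) = true then
    pvRunAux X Y i j (r + 1)
  else r
termination_by (i - r).toNat
decreasing_by omega

-- _suffix_run(X, Y, i, j)
def pvSuffixRun (X Y : List Char) (i j : Int) : Int := pvRunAux X Y i j 0

-- _best_common_run(X, Y)
def pvBestRun (X Y : List Char) : Int × Int :=
  let runs :=
    (PySem.List.pyRange 1 ((X.length : Int) + 1) 1).flatMap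
      (fun i => (PySem.List.pyRange 1 ((Y.length : Int) + 1) 1).map
        (fun j => (pvSuffixRun X Y i j, i)))
  let best := runs.foldl (fun b p => if p.1 > b then p.1 else b) 0
  if best = 0 then (0, 0)
  else (best,
    PySem.List.minD ((runs.filter (fun p => p.1 == best)).map (fun p => p.2)) (fun x => x) 0)

-- heuristic(state, goal) of Source B (same arithmetic, different lcs helper)
def pvHeurB (state goal : List Char) : Int :=
  let p := pvBestRun state goal
  let substr := PySem.List.slice state (some (p.2 - p.1)) (some p.2)
  let substr_ind := p.2 - p.1
  let goal_ind := PySem.Chars.find goal substr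
  let num_moves := |goal_ind - substr_ind|
  let num_moves' := if goal_ind < substr_ind then |substr_ind - (goal.length : Int)| + |goal_ind - 0| else num_moves
  (state.length : Int) - p.1 + num_moves'

def anagram_expand_alt (state : String) (goal : String) : List (String × Int) :=
  let s := state.toList
  let last := PySem.List.slice s (some (-1)) none
  let candidates :=
    (PySem.List.pyRange 0 ((s.length : Int) - 1) 1).map
      (fun pos => PySem.List.slice s none (some pos) ++ last ++ PySem.List.slice s (some pos) (some (-1)))
  candidates.map (fun ns => (String.ofList ns, if ns = goal.toList then (0 : Int) else pvHeurB ns goal.toList))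

-- ===== PRECONDITION & SPEC =====
-- Pre_ excludes exactly the inputs on which A RAISES IndexError: the DP table is allocated with
-- len(Y)+1 rows of len(X)+1 zeros but indexed dp[i][j] with i over X and j over Y, so when the
-- two lengths differ a character match falling outside the min(len)×min(len) square is an
-- out-of-range access; B returns normally there.
def Pre_anagram_expand (state : String) (goal : String) : Prop :=
  state.toList.length < 2 ∨ state.toList.length = goal.toList.length ∨
  (goal.toList.length < state.toList.length ∧
    ∀ pos : Nat, pos < state.toList.length - 1 →
      ∀ c ∈ (state.toList.take pos ++ state.toList.drop (state.toList.length - 1) ++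
             state.toList.dropLast.drop pos).drop goal.toList.length, c ∉ goal.toList) ∨
  (state.toList.length < goal.toList.length ∧
    ∀ c ∈ goal.toList.drop state.toList.length, c ∉ state.toList)

instance (state : String) (goal : String) : Decidable (Pre_anagram_expand state goal) := by
  unfold Pre_anagram_expand; infer_instance

def pvWitness_anagram_expand : String × String := ("", "")

def Spec_anagram_expand (state : String) (goal : String) (out : List (String × Int)) : Prop := out = anagram_expand_alt state goal
instance (state : String) (goal : String) (out : List (String × Int)) : Decidable (Spec_anagram_expand state goal out) := by unfold Spec_anagram_expand; infer_instance

-- ===== CLAIM (what is proved, stated in full; the proofs are below) =====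
def Claim_equal_anagram_expand : Prop := ∀ (state : String) (goal : String), Dom_anagram_expand state goal → Pre_anagram_expand state goal → Spec_anagram_expand state goal (anagram_expand state goal)

-- ===== LEMMAS AND PROOFS =====

-- length of the longest common suffix of X[:a] and Y[:b] (the value A's dp[a][b] holds and
-- B's _suffix_run computes)
def pvCS (X Y : List Char) : Nat → Nat → Int
  | 0, _ => 0
  | _ + 1, 0 => 0
  | a + 1, b + 1 => if (X[a]? == Y[b]?) && (X[a]?).isSome then pvCS X Y a b + 1 else 0

-- the (run value, 1-based end index in X) pairs, in A's i-outer/j-inner scan order,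
-- restricted to the first i0 rows
def pvBlock (X Y : List Char) (a : Nat) : List (Int × Int) :=
  (List.range Y.length).map (fun b => (pvCS X Y (a + 1) (b + 1), (1 + (a : Int))))

def pvLpref (X Y : List Char) (i0 : Nat) : List (Int × Int) :=
  (List.range i0).flatMap (pvBlock X Y)

-- A's strict-max update fold and B's two selections over the same pair list
def pvArgf (L : List (Int × Int)) : Int × Int :=
  L.foldl (fun s p => if p.1 > s.1 then p else s) ((0 : Int), (0 : Int))

def pvBestf (L : List (Int × Int)) : Int :=
  L.foldl (fun b p => if p.1 > b then p.1 else b) 0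

def pvSelI (L : List (Int × Int)) : Int :=
  if pvBestf L = 0 then 0 else ((L.find? (fun p => p.1 == pvBestf L)).map Prod.snd).getD 0

-- all character matches between X and Y lie inside the min-length square
def pvInSquare (X Y : List Char) : Prop :=
  ∀ a b, (h1 : a < X.length) → (h2 : b < Y.length) → X[a] = Y[b] →
    a < Y.length ∧ b < X.length

-- the DP-table invariant: entries of processed cells hold pvCS, the rest are 0
def pvDPInv (X Y : List Char) (i0 j0 : Nat) (dp : List (List Int)) : Prop :=
  dp.length = Y.length + 1 ∧
  (∀ r : Nat, r < dp.length → (PySem.List.pyGetD dp (r : Int) []).length = X.length + 1) ∧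
  (∀ r c : Nat, r ≤ Y.length → c ≤ X.length →
    PySem.List.pyGetD (PySem.List.pyGetD dp (r : Int) []) (c : Int) 0 =
      if (1 ≤ r ∧ r ≤ i0 ∧ 1 ≤ c) ∨ (r = i0 + 1 ∧ 1 ≤ c ∧ c ≤ j0) then pvCS X Y r c else 0)



lemma pvCS_zero_left (X Y : List Char) : ∀ a, pvCS X Y a 0 = 0 := by
  intro a; cases a <;> rfl

lemma pvCS_zero_right (X Y : List Char) (a b : Nat) (hb : Y.length ≤ b) :
    pvCS X Y (a + 1) (b + 1) = 0 := by
  have hY : Y[b]? = none := List.getElem?_eq_none hb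
  simp only [pvCS, hY]
  cases hX : X[a]? <;> simp [hX]

lemma pvArgf_append_singleton (L : List (Int × Int)) (p : Int × Int) :
    pvArgf (L ++ [p]) = if p.1 > (pvArgf L).1 then p else pvArgf L := by
  simp [pvArgf, List.foldl_append]

lemma pvArgf_spec (L : List (Int × Int)) :
    0 ≤ pvBestf L ∧ (∀ p ∈ L, p.1 ≤ pvBestf L) ∧
    (pvBestf L ≠ 0 → ∃ q ∈ L, L.find? (fun p => p.1 == pvBestf L) = some q ∧ q.1 = pvBestf L) ∧
    pvArgf L = (pvBestf L, pvSelI L) := by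
  induction L using List.reverseRecOn with
  | nil => refine ⟨le_refl _, by simp, by simp [pvBestf], ?_⟩; simp [pvArgf, pvBestf, pvSelI]
  | append_singleton L p ih =>
    obtain ⟨h0, hub, hfind, harg⟩ := ih
    have hb : pvBestf (L ++ [p]) = if p.1 > pvBestf L then p.1 else pvBestf L := by
      simp [pvBestf, List.foldl_append]
    by_cases hp : p.1 > pvBestf L
    · have hb' : pvBestf (L ++ [p]) = p.1 := by rw [hb, if_pos hp]
      have hnone : L.find? (fun q => q.1 == p.1) = none := by
        rw [List.find?_eq_none]
        intro q hq
        have := hub q hq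
        simp only [beq_iff_eq]
        omega
      have hsel : pvSelI (L ++ [p]) = p.2 := by
        unfold pvSelI
        rw [hb', if_neg (by omega), List.find?_append, hnone, Option.none_or]
        simp
      refine ⟨?_, ?_, ?_, ?_⟩
      · rw [hb']; omega
      · intro q hq
        rw [hb']
        rcases List.mem_append.1 hq with h | h
        · exact le_of_lt (lt_of_le_of_lt (hub q h) hp)
        · rw [List.mem_singleton] at h; subst h; exact le_refl _
      · intro _
        refine ⟨p, by simp, ?_, by rw [hb']⟩
        rw [hb', List.find?_append, hnone, Option.none_or]
        simp
      · rw [pvArgf_append_singleton, harg]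
        dsimp only
        rw [if_pos hp, hb', hsel]
    · have hb' : pvBestf (L ++ [p]) = pvBestf L := by rw [hb, if_neg hp]
      push_neg at hp
      have hsel : pvSelI (L ++ [p]) = pvSelI L := by
        unfold pvSelI
        rw [hb']
        by_cases hz : pvBestf L = 0
        · rw [if_pos hz, if_pos hz]
        · rw [if_neg hz, if_neg hz]
          obtain ⟨q, hqm, hq, _⟩ := hfind hz
          rw [List.find?_append, hq, Option.some_or]
      refine ⟨?_, ?_, ?_, ?_⟩
      · rw [hb']; exact h0
      · intro q hq
        rw [hb']
        rcases List.mem_append.1 hq with h | h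
        · exact hub q h
        · rw [List.mem_singleton] at h; subst h; exact hp
      · rw [hb']
        intro hne
        obtain ⟨q, hqm, hq, hq1⟩ := hfind hne
        exact ⟨q, List.mem_append_left _ hqm, by rw [List.find?_append, hq, Option.some_or], hq1⟩
      · rw [pvArgf_append_singleton, harg]
        dsimp only
        rw [if_neg (by exact not_lt.2 hp), hb', hsel]

lemma pvArgf_fst_nonneg (L : List (Int × Int)) : 0 ≤ (pvArgf L).1 := by
  obtain ⟨h0, _, _, h⟩ := pvArgf_spec L
  rw [h]; exact h0

lemma pvRunAux_eq (X Y : List Char) :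
    ∀ (a b : Nat) (i j r : Int), i - r = a → j - r = b → a ≤ X.length → b ≤ Y.length →
      pvRunAux X Y i j r = r + pvCS X Y a b := by
  intro a
  induction a with
  | zero =>
    intro b i j r hi hj _ _
    rw [pvRunAux, dif_neg (by push_cast at hi; omega)]
    simp [pvCS]
  | succ a ih =>
    intro b i j r hi hj ha hb
    push_cast at hi hj
    cases b with
    | zero =>
      rw [pvRunAux, dif_neg (by omega)]
      rw [pvCS_zero_left]; ring
    | succ b =>
      have hXa : a < X.length := by omega
      have hYb : b < Y.length := by omega
      have hgx : PySem.List.pyGet? X (i - r - 1) = X[a]? := by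
        rw [show i - r - 1 = ((a : Nat) : Int) by push_cast; omega, PySem.List.pyGet?_natCast]
      have hgy : PySem.List.pyGet? Y (j - r - 1) = Y[b]? := by
        rw [show j - r - 1 = ((b : Nat) : Int) by push_cast; omega, PySem.List.pyGet?_natCast]
      by_cases hc : X[a] = Y[b]
      · rw [pvRunAux, dif_pos ⟨by omega, by omega, by
          rw [hgx, hgy, List.getElem?_eq_getElem hXa, List.getElem?_eq_getElem hYb]
          simp [hc]⟩]
        rw [ih b i j (r + 1) (by push_cast; omega) (by push_cast; omega) (by omega) (by omega)]
        have hcs : pvCS X Y (a + 1) (b + 1) = pvCS X Y a b + 1 := by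
          simp [pvCS, List.getElem?_eq_getElem hXa, List.getElem?_eq_getElem hYb, hc]
        rw [hcs]; ring
      · rw [pvRunAux, dif_neg (by
          intro hcontra
          obtain ⟨_, _, hcc⟩ := hcontra
          rw [hgx, hgy, List.getElem?_eq_getElem hXa, List.getElem?_eq_getElem hYb] at hcc
          simp at hcc
          exact hc hcc)]
        have hcs : pvCS X Y (a + 1) (b + 1) = 0 := by
          simp [pvCS, List.getElem?_eq_getElem hXa, List.getElem?_eq_getElem hYb, hc]
        rw [hcs]; ring

lemma pvSuffixRun_eq (X Y : List Char) (a b : Nat) (ha : a ≤ X.length) (hb : b ≤ Y.length) :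
    pvSuffixRun X Y (a : Int) (b : Int) = pvCS X Y a b := by
  unfold pvSuffixRun
  rw [pvRunAux_eq X Y a b (a : Int) (b : Int) 0 (by omega) (by omega) ha hb]
  ring

lemma mem_pvLpref_snd (X Y : List Char) (i0 : Nat) (p : Int × Int) (hp : p ∈ pvLpref X Y i0) :
    ∃ a, a < i0 ∧ p.2 = 1 + (a : Int) := by
  simp only [pvLpref, List.mem_flatMap, pvBlock, List.mem_map, List.mem_range] at hp
  obtain ⟨a, ha, b, _, hb⟩ := hp
  exact ⟨a, ha, by rw [← hb]⟩

lemma pvLpref_succ (X Y : List Char) (i0 : Nat) :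
    pvLpref X Y (i0 + 1) = pvLpref X Y i0 ++ pvBlock X Y i0 := by
  unfold pvLpref
  rw [List.range_succ, List.flatMap_append]
  simp

lemma pvLpref_snd_pairwise (X Y : List Char) (i0 : Nat) :
    ((pvLpref X Y i0).map Prod.snd).Pairwise (· ≤ ·) := by
  induction i0 with
  | zero => simp [pvLpref]
  | succ i0 ih =>
    rw [pvLpref_succ, List.map_append, List.pairwise_append]
    refine ⟨ih, ?_, ?_⟩
    · simp only [pvBlock, List.map_map]
      exact List.Pairwise.map _ (fun a b _ => le_refl ((1 : Int) + (i0 : Int)))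
        (List.pairwise_lt_range)
    · intro x hx y hy
      simp only [List.mem_map] at hx hy
      obtain ⟨px, hpx, hx2⟩ := hx
      obtain ⟨py, hpy, hy2⟩ := hy
      obtain ⟨a, ha, hpa⟩ := mem_pvLpref_snd X Y i0 px hpx
      simp only [pvBlock, List.mem_map] at hpy
      obtain ⟨b, _, hb⟩ := hpy
      rw [← hx2, hpa, ← hy2, ← hb]
      simp only
      omega

lemma pvMinD_head (l : List Int) (hpw : l.Pairwise (· ≤ ·)) (hd : Int) (hh : l.head? = some hd) :
    PySem.List.minD l (fun x => x) 0 = hd := by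
  cases l with
  | nil => simp at hh
  | cons h t =>
    simp only [List.head?_cons, Option.some.injEq] at hh
    subst hh
    have hle : ∀ x ∈ t, h ≤ x := by
      intro x hx
      exact (List.pairwise_cons.1 hpw).1 x hx
    have haux : ∀ (t : List Int) (m : Int), (∀ x ∈ t, m ≤ x) →
        PySem.List.min? (m :: t) (fun x => x) = some m := by
      intro t
      induction t with
      | nil => intro m _; rfl
      | cons x t ihh =>
        intro m hm
        have hstep : PySem.List.min? (m :: x :: t) (fun x => x) =
            PySem.List.min? (m :: t) (fun x => x) := by
          unfold PySem.List.min?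
          simp only [List.foldl_cons]
          rw [if_neg (by have := hm x (by simp); omega)]
        rw [hstep]
        exact ihh m (fun y hy => hm y (by simp [hy]))
    unfold PySem.List.minD
    rw [haux t h hle]
    rfl

lemma pvBestRun_char (X Y : List Char) :
    pvBestRun X Y = (pvBestf (pvLpref X Y X.length), pvSelI (pvLpref X Y X.length)) := by
  have hR : ∀ k : Nat, PySem.List.pyRange 1 ((k : Int) + 1) 1 =
      (List.range k).map (fun a : Nat => 1 + (a : Int)) := by
    intro k
    rw [PySem.List.pyRange_one]
    norm_num
  have hruns :
      (PySem.List.pyRange 1 ((X.length : Int) + 1) 1).flatMap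
        (fun i => (PySem.List.pyRange 1 ((Y.length : Int) + 1) 1).map
          (fun j => (pvSuffixRun X Y i j, i))) = pvLpref X Y X.length := by
    simp only [hR, List.flatMap_map, List.map_map]
    unfold pvLpref
    rw [List.flatMap_def, List.flatMap_def]
    congr 1
    apply List.map_congr_left
    intro a ha
    rw [List.mem_range] at ha
    unfold pvBlock
    apply List.map_congr_left
    intro b hbm
    rw [List.mem_range] at hbm
    have h1 : (1 : Int) + (a : Int) = ((a + 1 : Nat) : Int) := by push_cast; ring
    have h2 : (1 : Int) + (b : Int) = ((b + 1 : Nat) : Int) := by push_cast; ring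
    simp only [Function.comp_apply]
    rw [h1, h2, pvSuffixRun_eq X Y (a + 1) (b + 1) (by omega) (by omega)]
  have hBR : pvBestRun X Y =
      (if pvBestf (pvLpref X Y X.length) = 0 then ((0 : Int), (0 : Int))
       else (pvBestf (pvLpref X Y X.length),
         PySem.List.minD (((pvLpref X Y X.length).filter
           (fun p => p.1 == pvBestf (pvLpref X Y X.length))).map (fun p => p.2))
           (fun x => x) 0)) := by
    unfold pvBestRun
    rw [hruns]
    rfl
  rw [hBR]
  obtain ⟨h0, hub, hfind, _⟩ := pvArgf_spec (pvLpref X Y X.length)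
  by_cases hz : pvBestf (pvLpref X Y X.length) = 0
  · rw [if_pos hz, hz]
    unfold pvSelI
    rw [hz, if_pos rfl]
  · rw [if_neg hz]
    obtain ⟨q, hqm, hq, hq1⟩ := hfind hz
    have hsel : pvSelI (pvLpref X Y X.length) = q.2 := by
      unfold pvSelI
      rw [if_neg hz, hq]
      rfl
    rw [hsel]
    congr 1
    have hhead : ((pvLpref X Y X.length).filter
        (fun p => p.1 == pvBestf (pvLpref X Y X.length))).head? = some q := by
      rw [List.head?_filter]
      exact hq
    have hpwL := pvLpref_snd_pairwise X Y X.length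
    have hsub : (((pvLpref X Y X.length).filter
        (fun p => p.1 == pvBestf (pvLpref X Y X.length))).map (fun p => p.2)).Pairwise (· ≤ ·) := by
      exact List.Pairwise.sublist (List.Sublist.map (fun p : Int × Int => p.2) List.filter_sublist) hpwL
    apply pvMinD_head _ hsub
    rw [show (fun p : Int × Int => p.2) = Prod.snd from rfl, List.head?_map, hhead]
    rfl

lemma pvDPInv_init (X Y : List Char) :
    pvDPInv X Y 0 0 ((PySem.List.pyRange 0 ((Y.length : Int) + 1) 1).map
      (fun _ => PySem.List.pyRepeat [(0 : Int)] ((X.length : Int) + 1))) := by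
  have hrep : PySem.List.pyRepeat [(0 : Int)] ((X.length : Int) + 1) =
      List.replicate (X.length + 1) (0 : Int) := by
    rw [PySem.List.pyRepeat_singleton]
    norm_num
  have hlen : ((PySem.List.pyRange 0 ((Y.length : Int) + 1) 1).map
      (fun _ => PySem.List.pyRepeat [(0 : Int)] ((X.length : Int) + 1))).length = Y.length + 1 := by
    rw [List.length_map, PySem.List.length_pyRange_one]
    norm_num
  have hrow : ∀ r : Nat, r < Y.length + 1 →
      PySem.List.pyGetD ((PySem.List.pyRange 0 ((Y.length : Int) + 1) 1).map
        (fun _ => PySem.List.pyRepeat [(0 : Int)] ((X.length : Int) + 1))) (r : Int) [] =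
      List.replicate (X.length + 1) (0 : Int) := by
    intro r hr
    have hrlt : r < (PySem.List.pyRange 0 ((Y.length : Int) + 1) 1).length := by
      rw [PySem.List.length_pyRange_one]
      omega
    rw [PySem.List.pyGetD_natCast, List.getD_eq_getElem?_getD, List.getElem?_map,
      List.getElem?_eq_getElem hrlt]
    simp [hrep]
  refine ⟨hlen, ?_, ?_⟩
  · intro r hr
    rw [hlen] at hr
    rw [hrow r hr, List.length_replicate]
  · intro r c hr hc
    rw [hrow r (by omega), PySem.List.pyGetD_natCast]
    rw [if_neg (by omega)]
    exact List.getD_replicate _ (by omega)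

lemma pvCell_step (X Y : List Char) (H : pvInSquare X Y) (i0 j0 : Nat)
    (hi : i0 < X.length) (hj : j0 < Y.length) (st : List (List Int) × Int × Int)
    (hdp : pvDPInv X Y i0 j0 st.1) (h0 : 0 ≤ st.2.1) :
    pvDPInv X Y i0 (j0 + 1) (pvLcsCell X Y (1 + (i0 : Int)) st (1 + (j0 : Int))).1 ∧
    (pvLcsCell X Y (1 + (i0 : Int)) st (1 + (j0 : Int))).2 =
      (if pvCS X Y (i0 + 1) (j0 + 1) > st.2.1 then (pvCS X Y (i0 + 1) (j0 + 1), 1 + (i0 : Int))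
       else st.2) := by
  obtain ⟨hL, hRL, hE⟩ := hdp
  have e1 : (1 + (i0 : Int)) - 1 = ((i0 : Nat) : Int) := by push_cast; ring
  have e2 : (1 + (j0 : Int)) - 1 = ((j0 : Nat) : Int) := by push_cast; ring
  have e3 : (1 + (i0 : Int)) = (((i0 + 1 : Nat)) : Int) := by push_cast; ring
  have e4 : (1 + (j0 : Int)) = (((j0 + 1 : Nat)) : Int) := by push_cast; ring
  unfold pvLcsCell
  rw [e1, e2, PySem.List.pyGet?_natCast, PySem.List.pyGet?_natCast,
    List.getElem?_eq_getElem hi, List.getElem?_eq_getElem hj]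
  by_cases hc : X[i0] = Y[j0]
  · obtain ⟨him, hbn⟩ := H i0 j0 hi hj hc
    rw [if_pos (by simp [hc])]
    have hread : PySem.List.pyGetD (PySem.List.pyGetD st.1 ((i0 : Nat) : Int) []) ((j0 : Nat) : Int) 0 + 1 =
        pvCS X Y (i0 + 1) (j0 + 1) := by
      rw [hE i0 j0 (by omega) (by omega)]
      have hcs : pvCS X Y (i0 + 1) (j0 + 1) = pvCS X Y i0 j0 + 1 := by
        simp [pvCS, List.getElem?_eq_getElem hi, List.getElem?_eq_getElem hj, hc]
      rw [hcs]
      by_cases hcase : (1 ≤ i0 ∧ i0 ≤ i0 ∧ 1 ≤ j0) ∨ (i0 = i0 + 1 ∧ 1 ≤ j0 ∧ j0 ≤ j0)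
      · rw [if_pos hcase]
      · rw [if_neg hcase]
        have hz : pvCS X Y i0 j0 = 0 := by
          rcases Nat.eq_zero_or_pos i0 with h | h
          · subst h; rfl
          · rcases Nat.eq_zero_or_pos j0 with h' | h'
            · subst h'; exact pvCS_zero_left X Y i0
            · exact absurd (Or.inl ⟨h, le_refl _, h'⟩) hcase
        omega
    rw [hread, e3, e4]
    have hnew : ∀ r c : Nat, r ≤ Y.length → c ≤ X.length →
        PySem.List.pyGetD (PySem.List.pyGetD
          (PySem.List.pySetD st.1 (((i0 + 1 : Nat)) : Int)
            (PySem.List.pySetD (PySem.List.pyGetD st.1 (((i0 + 1 : Nat)) : Int) [])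
              (((j0 + 1 : Nat)) : Int)
              (pvCS X Y (i0 + 1) (j0 + 1)))) (r : Int) []) (c : Int) 0 =
        if (1 ≤ r ∧ r ≤ i0 ∧ 1 ≤ c) ∨ (r = i0 + 1 ∧ 1 ≤ c ∧ c ≤ j0 + 1) then pvCS X Y r c
        else 0 := by
      intro r c hr hcle
      rw [PySem.List.pyGetD_pySetD_natCast _ _ _ _ _ (by omega)]
      by_cases hri : r = i0 + 1
      · subst hri
        rw [if_pos rfl]
        rw [PySem.List.pyGetD_pySetD_natCast _ _ _ _ _
          (by rw [hRL (i0 + 1) (by omega)]; omega)]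
        by_cases hcj : c = j0 + 1
        · rw [if_pos hcj, hcj, if_pos (Or.inr ⟨rfl, by omega, by omega⟩)]
        · rw [if_neg hcj, hE (i0 + 1) c hr hcle]
          rw [if_congr (by omega : ((1 ≤ i0 + 1 ∧ i0 + 1 ≤ i0 ∧ 1 ≤ c) ∨ (i0 + 1 = i0 + 1 ∧ 1 ≤ c ∧ c ≤ j0)) ↔
            ((1 ≤ i0 + 1 ∧ i0 + 1 ≤ i0 ∧ 1 ≤ c) ∨ (i0 + 1 = i0 + 1 ∧ 1 ≤ c ∧ c ≤ j0 + 1))) rfl rfl]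
      · rw [if_neg hri, hE r c hr hcle]
        rw [if_congr (by omega : ((1 ≤ r ∧ r ≤ i0 ∧ 1 ≤ c) ∨ (r = i0 + 1 ∧ 1 ≤ c ∧ c ≤ j0)) ↔
          ((1 ≤ r ∧ r ≤ i0 ∧ 1 ≤ c) ∨ (r = i0 + 1 ∧ 1 ≤ c ∧ c ≤ j0 + 1))) rfl rfl]
    have hdpnew : pvDPInv X Y i0 (j0 + 1)
        (PySem.List.pySetD st.1 (((i0 + 1 : Nat)) : Int)
          (PySem.List.pySetD (PySem.List.pyGetD st.1 (((i0 + 1 : Nat)) : Int) [])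
            (((j0 + 1 : Nat)) : Int)
            (pvCS X Y (i0 + 1) (j0 + 1)))) := by
      refine ⟨by rw [PySem.List.length_pySetD]; exact hL, ?_, hnew⟩
      intro r hr
      rw [PySem.List.length_pySetD] at hr
      rw [PySem.List.pyGetD_pySetD_natCast _ _ _ _ _ (by omega)]
      by_cases hri : r = i0 + 1
      · rw [if_pos hri, PySem.List.length_pySetD]
        exact hRL (i0 + 1) (by omega)
      · rw [if_neg hri]
        exact hRL r hr
    by_cases hv : pvCS X Y (i0 + 1) (j0 + 1) > st.2.1
    · rw [if_pos hv, if_pos hv]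
      exact ⟨hdpnew, rfl⟩
    · rw [if_neg hv, if_neg hv]
      exact ⟨hdpnew, rfl⟩
  · rw [if_neg (by simp [hc])]
    have hcs : pvCS X Y (i0 + 1) (j0 + 1) = 0 := by
      simp [pvCS, List.getElem?_eq_getElem hi, List.getElem?_eq_getElem hj, hc]
    refine ⟨⟨hL, hRL, ?_⟩, ?_⟩
    · intro r c hr hcle
      rw [hE r c hr hcle]
      by_cases hsp : r = i0 + 1 ∧ c = j0 + 1
      · rw [if_neg (by omega), if_pos (Or.inr ⟨hsp.1, by omega, by omega⟩), hsp.1, hsp.2, hcs]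
      · rw [if_congr (by omega : ((1 ≤ r ∧ r ≤ i0 ∧ 1 ≤ c) ∨ (r = i0 + 1 ∧ 1 ≤ c ∧ c ≤ j0)) ↔
          ((1 ≤ r ∧ r ≤ i0 ∧ 1 ≤ c) ∨ (r = i0 + 1 ∧ 1 ≤ c ∧ c ≤ j0 + 1))) rfl rfl]
    · rw [if_neg (by omega)]

lemma pvDPInv_row_done (X Y : List Char) (i0 : Nat) (dp : List (List Int))
    (h : pvDPInv X Y i0 Y.length dp) : pvDPInv X Y (i0 + 1) 0 dp := by
  obtain ⟨hL, hRL, hE⟩ := h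
  refine ⟨hL, hRL, ?_⟩
  intro r c hr hcle
  rw [hE r c hr hcle]
  by_cases hsp : r = i0 + 1 ∧ Y.length + 1 ≤ c
  · rw [if_neg (by omega), if_pos (Or.inl ⟨by omega, by omega, by omega⟩)]
    obtain ⟨c', rfl⟩ : ∃ c', c = c' + 1 := ⟨c - 1, by omega⟩
    rw [hsp.1, pvCS_zero_right X Y i0 c' (by omega)]
  · rw [if_congr (by omega : ((1 ≤ r ∧ r ≤ i0 ∧ 1 ≤ c) ∨ (r = i0 + 1 ∧ 1 ≤ c ∧ c ≤ Y.length)) ↔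
      ((1 ≤ r ∧ r ≤ i0 + 1 ∧ 1 ≤ c) ∨ (r = i0 + 1 + 1 ∧ 1 ≤ c ∧ c ≤ 0))) rfl rfl]

lemma pvInner_inv (X Y : List Char) (H : pvInSquare X Y) (i0 : Nat) (hi : i0 < X.length)
    (st : List (List Int) × Int × Int) (hdp : pvDPInv X Y i0 0 st.1)
    (hpr : st.2 = pvArgf (pvLpref X Y i0)) :
    ∀ j0, j0 ≤ Y.length →
      pvDPInv X Y i0 j0
        (((List.range j0).map (fun b : Nat => 1 + (b : Int))).foldl
          (pvLcsCell X Y (1 + (i0 : Int))) st).1 ∧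
      (((List.range j0).map (fun b : Nat => 1 + (b : Int))).foldl
          (pvLcsCell X Y (1 + (i0 : Int))) st).2 =
        pvArgf (pvLpref X Y i0 ++
          (List.range j0).map (fun b => (pvCS X Y (i0 + 1) (b + 1), 1 + (i0 : Int)))) := by
  intro j0
  induction j0 with
  | zero =>
    intro _
    simpa using ⟨hdp, hpr⟩
  | succ j0 ih =>
    intro hj1
    have hj : j0 < Y.length := by omega
    obtain ⟨ih1, ih2⟩ := ih (by omega)
    have hprev0 : 0 ≤ (((List.range j0).map (fun b : Nat => 1 + (b : Int))).foldl
        (pvLcsCell X Y (1 + (i0 : Int))) st).2.1 := by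
      rw [ih2]
      exact pvArgf_fst_nonneg _
    have hstep := pvCell_step X Y H i0 j0 hi hj _ ih1 hprev0
    rw [List.range_succ, List.map_append, List.foldl_append]
    simp only [List.map_cons, List.map_nil, List.foldl_cons, List.foldl_nil]
    refine ⟨hstep.1, ?_⟩
    rw [hstep.2, ih2, List.map_append, ← List.append_assoc]
    simp only [List.map_cons, List.map_nil]
    rw [pvArgf_append_singleton]

lemma pvOuter_inv (X Y : List Char) (H : pvInSquare X Y) :
    ∀ i0, i0 ≤ X.length →
      pvDPInv X Y i0 0
        (((List.range i0).map (fun a : Nat => 1 + (a : Int))).foldl (pvLcsInner X Y)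
          ((PySem.List.pyRange 0 ((Y.length : Int) + 1) 1).map
            (fun _ => PySem.List.pyRepeat [(0 : Int)] ((X.length : Int) + 1)), 0, 0)).1 ∧
      (((List.range i0).map (fun a : Nat => 1 + (a : Int))).foldl (pvLcsInner X Y)
          ((PySem.List.pyRange 0 ((Y.length : Int) + 1) 1).map
            (fun _ => PySem.List.pyRepeat [(0 : Int)] ((X.length : Int) + 1)), 0, 0)).2 =
        pvArgf (pvLpref X Y i0) := by
  intro i0
  induction i0 with
  | zero =>
    intro _
    exact ⟨pvDPInv_init X Y, rfl⟩
  | succ i0 ih =>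
    intro hi1
    have hi : i0 < X.length := by omega
    obtain ⟨ih1, ih2⟩ := ih (by omega)
    rw [List.range_succ, List.map_append, List.foldl_append]
    simp only [List.map_cons, List.map_nil, List.foldl_cons, List.foldl_nil]
    have hR : PySem.List.pyRange 1 ((Y.length : Int) + 1) 1 =
        (List.range Y.length).map (fun b : Nat => 1 + (b : Int)) := by
      rw [PySem.List.pyRange_one]
      norm_num
    have hIn : ∀ stx : List (List Int) × Int × Int, pvLcsInner X Y stx (1 + (i0 : Int)) =
        ((List.range Y.length).map (fun b : Nat => 1 + (b : Int))).foldl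
          (pvLcsCell X Y (1 + (i0 : Int))) stx := by
      intro stx
      unfold pvLcsInner
      rw [hR]
    rw [hIn]
    have hfin := pvInner_inv X Y H i0 hi _ ih1 ih2 Y.length (le_refl _)
    refine ⟨pvDPInv_row_done X Y i0 _ hfin.1, ?_⟩
    rw [hfin.2, pvLpref_succ]
    rfl

lemma pvLcsA_char (X Y : List Char) (H : pvInSquare X Y) :
    pvLcsA X Y = (pvBestf (pvLpref X Y X.length), pvSelI (pvLpref X Y X.length)) := by
  have hR : PySem.List.pyRange 1 ((X.length : Int) + 1) 1 =
      (List.range X.length).map (fun a : Nat => 1 + (a : Int)) := by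
    rw [PySem.List.pyRange_one]
    norm_num
  have hA : pvLcsA X Y =
      (((List.range X.length).map (fun a : Nat => 1 + (a : Int))).foldl (pvLcsInner X Y)
        ((PySem.List.pyRange 0 ((Y.length : Int) + 1) 1).map
          (fun _ => PySem.List.pyRepeat [(0 : Int)] ((X.length : Int) + 1)), 0, 0)).2 := by
    unfold pvLcsA
    rw [hR]
  rw [hA, (pvOuter_inv X Y H X.length (le_refl _)).2]
  obtain ⟨_, _, _, harg⟩ := pvArgf_spec (pvLpref X Y X.length)
  exact harg

lemma pvHeur_eq (s g : List Char) (H : pvInSquare s g) : pvHeurA s g = pvHeurB s g := by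
  unfold pvHeurA pvHeurB
  rw [show pvLcsA s g = pvBestRun s g from (pvLcsA_char s g H).trans (pvBestRun_char s g).symm]

lemma pvSliceMid (s : List Char) (p : Nat) (hp : p ≤ s.length) :
    PySem.List.slice s (some (p : Int)) (some (-1)) = s.dropLast.drop p := by
  unfold PySem.List.slice
  dsimp only
  rw [PySem.List.clampIdx_natCast, PySem.List.clampIdx_neg_one, Nat.min_eq_left hp]
  rw [List.dropLast_eq_take, List.drop_take]

lemma pvNsMem (s : List Char) (p : Nat) (c : Char)
    (hc : c ∈ s.take p ++ s.drop (s.length - 1) ++ s.dropLast.drop p) : c ∈ s := by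
  rcases List.mem_append.1 hc with h | h
  · rcases List.mem_append.1 h with h' | h'
    · exact List.mem_of_mem_take h'
    · exact List.mem_of_mem_drop h'
  · have hm := List.mem_of_mem_drop h
    rw [List.dropLast_eq_take] at hm
    exact List.mem_of_mem_take hm

lemma pvGetElemMemDrop (l : List Char) (k a : Nat) (ha : a < l.length) (hk : k ≤ a) :
    l[a] ∈ l.drop k := by
  have hlt : a - k < (l.drop k).length := by
    rw [List.length_drop]
    omega
  have he : (l.drop k)[a - k] = l[a] := by
    rw [List.getElem_drop]
    congr 1
    omega
  rw [← he]
  exact List.getElem_mem hlt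

-- ===== VERDICT (by name: the statement is the Claim_ definition above) =====
theorem anagram_expand_spec : Claim_equal_anagram_expand := by
  unfold Claim_equal_anagram_expand
  intro state goal hdom hpre
  unfold Spec_anagram_expand
  unfold Pre_anagram_expand at hpre
  unfold anagram_expand anagram_expand_alt
  simp only [List.map_map]
  rw [PySem.List.foldl_append_singleton_eq_map, List.nil_append]
  apply List.map_congr_left
  intro pos hpos
  dsimp only [Function.comp]
  obtain ⟨hpos0, hposlt⟩ := PySem.List.mem_pyRange_one.1 hpos
  have hposn : pos = ((pos.toNat : Nat) : Int) := (Int.toNat_of_nonneg hpos0).symm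
  set s := state.toList with hs
  set g := goal.toList with hg
  set p := pos.toNat with hpdef
  have hplt : p < s.length - 1 := by omega
  have h2n : 2 ≤ s.length := by omega
  have hns : PySem.List.slice s none (some pos) ++ PySem.List.slice s (some (-1)) none ++
      PySem.List.slice s (some pos) (some (-1)) =
      s.take p ++ s.drop (s.length - 1) ++ s.dropLast.drop p := by
    rw [hposn, PySem.List.slice_to_natCast, PySem.List.slice_from_neg_one,
      pvSliceMid s p (by omega)]
  simp only [hns]
  set ns := s.take p ++ s.drop (s.length - 1) ++ s.dropLast.drop p with hnsdef
  have hnslen : ns.length = s.length := by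
    rw [hnsdef]
    simp only [List.length_append, List.length_take, List.length_drop, List.length_dropLast]
    omega
  by_cases hng : ns = g
  · simp [hng]
  · simp only [if_neg hng]
    have hsq : pvInSquare ns g := by
      rcases hpre with hlt2 | heq | ⟨hmn, htail⟩ | ⟨hnm, hdisj⟩
      · omega
      · intro a b h1 h2 _
        rw [hnslen] at h1
        exact ⟨by omega, by rw [hnslen]; omega⟩
      · intro a b h1 h2 hab
        rw [hnslen] at h1
        refine ⟨?_, by rw [hnslen]; omega⟩
        by_contra hma
        push_neg at hma
        have hmem : ns[a]'(by rw [hnslen]; omega) ∈ ns.drop g.length :=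
          pvGetElemMemDrop ns g.length a (by rw [hnslen]; omega) hma
        have hnin := htail p hplt _ hmem
        rw [hab] at hnin
        exact hnin (List.getElem_mem h2)
      · intro a b h1 h2 hab
        rw [hnslen] at h1
        refine ⟨by omega, ?_⟩
        rw [hnslen]
        by_contra hbn
        push_neg at hbn
        have hmem : g[b]'h2 ∈ g.drop s.length :=
          pvGetElemMemDrop g s.length b h2 hbn
        have hnin := hdisj _ hmem
        rw [← hab] at hnin
        exact hnin (pvNsMem s p _ (List.getElem_mem (by rw [hnslen]; omega)))
    rw [pvHeur_eq ns g hsq]
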